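-- pv_equiv track=rewrite | github.com/Springo/AdventOfCode2023 | d21.py | adj_comp
-- ===== SOURCE A (Python) =====
-- from copy import deepcopy
--
-- def adj_comp(orig_list, new_list=None, comp=1):
--     if new_list is None:
--         new_list = deepcopy(orig_list)
--     if comp <= 1:
--         return orig_list
--
--     new_new_list = dict()
--     for i, j in new_list:
--         new_new_list[(i, j)] = set()
--         for i2, j2 in new_list[(i, j)]:
--             for i3, j3 in orig_list[(i2, j2)]:
--                 new_new_list[(i, j)].add((i3, j3))
--     return adj_comp(orig_list, new_new_list, comp - 1)
-- ===== SOURCE B (Python) =====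
-- def adj_comp(orig_list, new_list=None, comp=1):
--     # A's recursion threads orig_list through every call and its base case
--     # returns orig_list, discarding every composed dict it builds; so the
--     # return value is always orig_list itself.  B returns it directly.
--     return orig_list
-- ===== Notes on version B (the rewrite author's own statement) =====
-- stated objective: simpler
-- what changed: A recursively builds comp-1 relation compositions but its base case returns orig_list, so every composed dict is discarded and the return value is always orig_list; B returns orig_list directly with no recursion.
import Mathlib
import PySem

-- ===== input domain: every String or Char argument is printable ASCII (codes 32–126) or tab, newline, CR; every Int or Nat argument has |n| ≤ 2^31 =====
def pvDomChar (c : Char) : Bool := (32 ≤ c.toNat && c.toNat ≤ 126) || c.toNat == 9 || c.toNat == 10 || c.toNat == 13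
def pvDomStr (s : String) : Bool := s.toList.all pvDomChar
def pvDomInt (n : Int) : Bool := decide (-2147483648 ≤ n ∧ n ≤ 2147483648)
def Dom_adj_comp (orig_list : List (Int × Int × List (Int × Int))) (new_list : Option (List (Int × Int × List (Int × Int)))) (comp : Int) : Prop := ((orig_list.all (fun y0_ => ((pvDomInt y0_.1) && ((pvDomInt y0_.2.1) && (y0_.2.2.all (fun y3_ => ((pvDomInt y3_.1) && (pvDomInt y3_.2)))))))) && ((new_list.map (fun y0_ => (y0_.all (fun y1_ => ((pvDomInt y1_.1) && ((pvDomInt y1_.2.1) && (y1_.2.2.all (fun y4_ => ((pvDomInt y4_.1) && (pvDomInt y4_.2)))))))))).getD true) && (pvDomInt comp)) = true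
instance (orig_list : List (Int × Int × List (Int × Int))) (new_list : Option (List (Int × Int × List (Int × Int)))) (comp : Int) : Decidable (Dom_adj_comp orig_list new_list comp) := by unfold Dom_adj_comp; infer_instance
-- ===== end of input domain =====

-- B: A's recursion always returns orig_list unchanged (its base case returns orig_list,
-- discarding every composed dict), so B returns orig_list directly — simpler, no recursion.


-- ===== PORT A =====
-- dict lookup d[(i,j)] on the association list (first match; none = KeyError)
def pvLookup (d : List (Int × Int × List (Int × Int))) (k : Int × Int) : Option (List (Int × Int)) :=
  match d with
  | [] => none
  | (i, j, vs) :: rest => if (i, j) = k then some vs else pvLookup rest k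

-- Literal port of A.  deepcopy is the identity on pure values.  The inner Python sets are
-- modeled by PySem.Set in insertion order; `(pvLookup … ).getD []` stands for a dict lookup
-- that Pre_adj_comp guarantees never raises KeyError.
def adj_comp (orig_list : List (Int × Int × List (Int × Int))) (new_list : Option (List (Int × Int × List (Int × Int)))) (comp : Int) : List (Int × Int × List (Int × Int)) :=
  let nl := new_list.getD orig_list
  if comp ≤ 1 then orig_list
  else
    -- new_new_list: same keys as nl, value = union over (i2,j2) ∈ nl[(i,j)] of orig_list[(i2,j2)]
    let new_new_list : List (Int × Int × List (Int × Int)) :=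
      nl.map (fun e =>
        (e.1, e.2.1,
          ((pvLookup nl (e.1, e.2.1)).getD []).foldl
            (fun s p => PySem.Set.update s ((pvLookup orig_list p).getD []))
            PySem.Set.empty))
    adj_comp orig_list (some new_new_list) (comp - 1)
termination_by comp.toNat
decreasing_by omega

-- ===== PORT B =====
def adj_comp_alt (orig_list : List (Int × Int × List (Int × Int))) (new_list : Option (List (Int × Int × List (Int × Int)))) (comp : Int) : List (Int × Int × List (Int × Int)) :=
  orig_list

-- ===== PRECONDITION & SPEC =====
def pvKeys (d : List (Int × Int × List (Int × Int))) : List (Int × Int) := d.map (fun e => (e.1, e.2.1))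
def pvTargets (d : List (Int × Int × List (Int × Int))) : List (Int × Int) := (d.map (fun e => e.2.2)).flatten
-- Pre_ excludes inputs on which A raises KeyError (a looked-up neighbour pair that is not a
-- key of orig_list).  It is slightly conservative for comp ≥ 3: it requires every neighbour
-- listed anywhere in orig_list to be a key, even ones A's recursion never actually reaches
-- (see claim.json "cites" for one such excluded input on which A still returns).
def Pre_adj_comp (orig_list : List (Int × Int × List (Int × Int))) (new_list : Option (List (Int × Int × List (Int × Int)))) (comp : Int) : Prop :=
  comp ≤ 1 ∨
    ((∀ p ∈ pvTargets (new_list.getD orig_list), p ∈ pvKeys orig_list) ∧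
     (comp = 2 ∨ ∀ p ∈ pvTargets orig_list, p ∈ pvKeys orig_list))
instance (orig_list : List (Int × Int × List (Int × Int))) (new_list : Option (List (Int × Int × List (Int × Int)))) (comp : Int) : Decidable (Pre_adj_comp orig_list new_list comp) := by unfold Pre_adj_comp; infer_instance

def pvWitness_adj_comp : (List (Int × Int × List (Int × Int))) × (Option (List (Int × Int × List (Int × Int)))) × Int :=
  ([(0, 0, [(0, 0)])], none, 3)

def Spec_adj_comp (orig_list : List (Int × Int × List (Int × Int))) (new_list : Option (List (Int × Int × List (Int × Int)))) (comp : Int) (out : List (Int × Int × List (Int × Int))) : Prop := out = adj_comp_alt orig_list new_list comp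
instance (orig_list : List (Int × Int × List (Int × Int))) (new_list : Option (List (Int × Int × List (Int × Int)))) (comp : Int) (out : List (Int × Int × List (Int × Int))) : Decidable (Spec_adj_comp orig_list new_list comp out) := by unfold Spec_adj_comp; infer_instance

-- ===== CLAIM (what is proved, stated in full; the proofs are below) =====
def Claim_equal_adj_comp : Prop := ∀ (orig_list : List (Int × Int × List (Int × Int))) (new_list : Option (List (Int × Int × List (Int × Int)))) (comp : Int), Dom_adj_comp orig_list new_list comp → Pre_adj_comp orig_list new_list comp → Spec_adj_comp orig_list new_list comp (adj_comp orig_list new_list comp)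

-- ===== LEMMAS AND PROOFS =====
-- A returns its first argument on every input: the base case returns orig_list and the
-- recursive call keeps orig_list in first position.
theorem adj_comp_eq_orig (orig_list : List (Int × Int × List (Int × Int))) :
    ∀ (n : Nat) (comp : Int), comp.toNat ≤ n →
      ∀ (new_list : Option (List (Int × Int × List (Int × Int)))),
        adj_comp orig_list new_list comp = orig_list := by
  intro n
  induction n with
  | zero =>
    intro comp h new_list
    have hc : comp ≤ 1 := by omega
    rw [adj_comp.eq_1]
    simp [hc]
  | succ k ih =>
    intro comp h new_list
    by_cases hc : comp ≤ 1
    · rw [adj_comp.eq_1]; simp [hc]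
    · rw [adj_comp.eq_1]
      simp only [hc, if_false]
      exact ih (comp - 1) (by omega) _

-- ===== VERDICT (by name: the statement is the Claim_ definition above) =====
theorem adj_comp_spec : Claim_equal_adj_comp := by
  intro orig_list new_list comp _ _
  unfold Spec_adj_comp adj_comp_alt
  exact adj_comp_eq_orig orig_list comp.toNat comp (le_refl _) new_list
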